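-- pv_equiv track=rewrite | github.com/chraker/AOC2022 | day15.py | get_sensor_edge_points
-- ===== SOURCE A (Python) =====
-- def get_sensor_edge_points(sensor, r):
--     edges = set()
--     (x, y), distance = sensor
--     [[minx, maxx], [miny, maxy]] = r
--
--     iy = y
--     iy2 = y
--
--     for ix in range(x - distance - 1, x):
--         if minx <= ix <= maxx:
--             if miny <= iy <= maxy:
--                 edges.add(tuple([ix, iy]))
--             if miny <= iy2 <= maxy:
--                 edges.add(tuple([ix, iy2]))
--         iy += 1
--         iy2 -= 1
--
--     iy = y - distance - 1
--     iy2 = y + distance + 1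
--     for ix in range(x, x + distance + 2):
--         if minx <= ix <= maxx:
--             if miny <= iy <= maxy:
--                 edges.add(tuple([ix, iy]))
--             if miny <= iy2 <= maxy:
--                 edges.add(tuple([ix, iy2]))
--         iy += 1
--         iy2 -= 1
--
--     return edges
-- ===== SOURCE B (Python) =====
-- def get_sensor_edge_points(sensor, r):
--     (x, y), distance = sensor
--     [[minx, maxx], [miny, maxy]] = r
--     k = distance + 1
--     edges = set()
--     for dx in range(-k, k + 1):
--         dy = k - abs(dx)
--         s = 1 if dx >= 0 else -1
--         for ny in (y - s * dy, y + s * dy):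
--             if minx <= x + dx <= maxx and miny <= ny <= maxy:
--                 edges.add((x + dx, ny))
--     return edges
-- ===== Notes on version B (the rewrite author's own statement) =====
-- stated objective: simpler
-- what changed: A threads two opposing running counters (iy, iy2) across two separate ix loops; B makes one symmetric pass over the horizontal offset dx in range(-(distance+1), distance+2), deriving the vertical offset as dy = (distance+1) - abs(dx) and guarding each of the two mirror points with a single combined box check.
-- outside the precondition, e.g. on get_sensor_edge_points(((0, 0), 1), [[0, 5]]): A raises ValueError, B raises ValueError
import Mathlib
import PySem

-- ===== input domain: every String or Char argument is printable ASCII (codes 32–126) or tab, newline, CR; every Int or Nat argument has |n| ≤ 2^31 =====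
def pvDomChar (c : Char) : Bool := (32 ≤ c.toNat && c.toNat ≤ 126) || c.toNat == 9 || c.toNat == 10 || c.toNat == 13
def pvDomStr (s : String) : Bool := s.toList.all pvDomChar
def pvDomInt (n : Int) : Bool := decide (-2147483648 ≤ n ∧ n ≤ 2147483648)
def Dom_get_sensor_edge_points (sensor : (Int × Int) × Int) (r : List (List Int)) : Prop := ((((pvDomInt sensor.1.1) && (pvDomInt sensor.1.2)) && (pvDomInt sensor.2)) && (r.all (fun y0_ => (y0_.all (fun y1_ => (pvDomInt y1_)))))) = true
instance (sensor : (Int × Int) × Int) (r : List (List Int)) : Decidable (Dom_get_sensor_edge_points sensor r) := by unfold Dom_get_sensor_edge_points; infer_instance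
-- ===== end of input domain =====

-- B replaces A's two directional loops threading running counters by one symmetric pass over the
-- horizontal offset dx with dy derived as (distance+1) - |dx|; a simpler decomposition, same cost.


-- ===== PORT A =====
-- loop body of A: state (edges, iy, iy2), one iteration for the loop variable ix
def pvStepA (minx maxx miny maxy : Int) (st : List (Int × Int) × Int × Int) (ix : Int) : List (Int × Int) × Int × Int :=
  let edges := st.1
  let iy := st.2.1
  let iy2 := st.2.2
  let edges :=
    if minx ≤ ix ∧ ix ≤ maxx then
      let edges := if miny ≤ iy ∧ iy ≤ maxy then PySem.Set.add edges (ix, iy) else edges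
      if miny ≤ iy2 ∧ iy2 ≤ maxy then PySem.Set.add edges (ix, iy2) else edges
    else edges
  (edges, iy + 1, iy2 - 1)

def get_sensor_edge_points (sensor : (Int × Int) × Int) (r : List (List Int)) : List (Int × Int) :=
  -- the unpacking '[[minx, maxx], [miny, maxy]] = r' raises on any other shape: excluded by Pre_
  if r.length = 2 ∧ (r.getD 0 []).length = 2 ∧ (r.getD 1 []).length = 2 then
    let x := sensor.1.1
    let y := sensor.1.2
    let distance := sensor.2
    let minx := (r.getD 0 []).getD 0 0
    let maxx := (r.getD 0 []).getD 1 0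
    let miny := (r.getD 1 []).getD 0 0
    let maxy := (r.getD 1 []).getD 1 0
    let st1 := (PySem.List.pyRange (x - distance - 1) x 1).foldl (pvStepA minx maxx miny maxy)
                 ((PySem.Set.empty : PySem.Set (Int × Int)), y, y)
    let st2 := (PySem.List.pyRange x (x + distance + 2) 1).foldl (pvStepA minx maxx miny maxy)
                 (st1.1, y - distance - 1, y + distance + 1)
    st2.1
  else []

-- ===== PORT B =====
-- loop body of B: for one dx add the two mirror points (x+dx, y∓s*dy), each guarded by the box check
def pvStepB (x y minx maxx miny maxy k : Int) (edges : List (Int × Int)) (dx : Int) : List (Int × Int) :=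
  let dy := k - |dx|
  let s : Int := if 0 ≤ dx then 1 else -1
  let edges := if minx ≤ x + dx ∧ x + dx ≤ maxx ∧ miny ≤ y - s * dy ∧ y - s * dy ≤ maxy
               then PySem.Set.add edges (x + dx, y - s * dy) else edges
  if minx ≤ x + dx ∧ x + dx ≤ maxx ∧ miny ≤ y + s * dy ∧ y + s * dy ≤ maxy
  then PySem.Set.add edges (x + dx, y + s * dy) else edges

def get_sensor_edge_points_alt (sensor : (Int × Int) × Int) (r : List (List Int)) : List (Int × Int) :=
  -- the unpacking '[[minx, maxx], [miny, maxy]] = r' raises on any other shape: excluded by Pre_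
  if r.length = 2 ∧ (r.getD 0 []).length = 2 ∧ (r.getD 1 []).length = 2 then
    let x := sensor.1.1
    let y := sensor.1.2
    let k := sensor.2 + 1
    (PySem.List.pyRange (-k) (k + 1) 1).foldl
      (pvStepB x y ((r.getD 0 []).getD 0 0) ((r.getD 0 []).getD 1 0)
        ((r.getD 1 []).getD 0 0) ((r.getD 1 []).getD 1 0) k)
      (PySem.Set.empty : PySem.Set (Int × Int))
  else []

-- ===== PRECONDITION & SPEC =====
-- Pre_ excludes only the r on which A's unpacking '[[minx, maxx], [miny, maxy]] = r' raises (ValueError/TypeError)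
def Pre_get_sensor_edge_points (sensor : (Int × Int) × Int) (r : List (List Int)) : Prop :=
  r.length = 2 ∧ ∀ l ∈ r, l.length = 2
instance (sensor : (Int × Int) × Int) (r : List (List Int)) : Decidable (Pre_get_sensor_edge_points sensor r) := by unfold Pre_get_sensor_edge_points; infer_instance
def pvWitness_get_sensor_edge_points : ((Int × Int) × Int) × List (List Int) := (((0, 0), 2), [[-5, 5], [-5, 5]])

def Spec_get_sensor_edge_points (sensor : (Int × Int) × Int) (r : List (List Int)) (out : List (Int × Int)) : Prop := out = get_sensor_edge_points_alt sensor r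
instance (sensor : (Int × Int) × Int) (r : List (List Int)) (out : List (Int × Int)) : Decidable (Spec_get_sensor_edge_points sensor r out) := by unfold Spec_get_sensor_edge_points; infer_instance

-- ===== CLAIM (what is proved, stated in full; the proofs are below) =====
def Claim_equal_get_sensor_edge_points : Prop := ∀ (sensor : (Int × Int) × Int) (r : List (List Int)), Dom_get_sensor_edge_points sensor r → Pre_get_sensor_edge_points sensor r → Spec_get_sensor_edge_points sensor r (get_sensor_edge_points sensor r)

-- ===== LEMMAS AND PROOFS =====

-- the edges-update of A's loop body, as a pure function of ix and the two counters
def pvBody (minx maxx miny maxy : Int) (e : List (Int × Int)) (ix iy iy2 : Int) : List (Int × Int) :=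
  if minx ≤ ix ∧ ix ≤ maxx then
    let e1 := if miny ≤ iy ∧ iy ≤ maxy then PySem.Set.add e (ix, iy) else e
    if miny ≤ iy2 ∧ iy2 ≤ maxy then PySem.Set.add e1 (ix, iy2) else e1
  else e

lemma pvStepA_eq (minx maxx miny maxy : Int) (st : List (Int × Int) × Int × Int) (ix : Int) :
    pvStepA minx maxx miny maxy st ix
      = (pvBody minx maxx miny maxy st.1 ix st.2.1 st.2.2, st.2.1 + 1, st.2.2 - 1) := rfl

-- counter elimination: a fold carrying the counters iy = u + ix, iy2 = v - ix equals a fold of the pure body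
lemma foldA_elim (minx maxx miny maxy u v : Int) :
    ∀ (n : Nat) (a b : Int), (b - a).toNat = n → ∀ (e : List (Int × Int)),
      ((PySem.List.pyRange a b 1).foldl (pvStepA minx maxx miny maxy) (e, u + a, v - a)).1
        = (PySem.List.pyRange a b 1).foldl
            (fun e ix => pvBody minx maxx miny maxy e ix (u + ix) (v - ix)) e := by
  intro n
  induction n with
  | zero =>
      intro a b h e
      rw [PySem.List.pyRange_one_eq_nil (by omega)]
      rfl
  | succ m ih =>
      intro a b h e
      rw [PySem.List.pyRange_one_cons (by omega)]
      simp only [List.foldl_cons, pvStepA_eq]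
      have h1 : u + a + 1 = u + (a + 1) := by ring
      have h2 : v - a - 1 = v - (a + 1) := by ring
      rw [h1, h2]
      exact ih (a + 1) b (by omega) _

-- range shift
lemma pyRange_shift (a b c : Int) :
    PySem.List.pyRange (a + c) (b + c) 1 = (PySem.List.pyRange a b 1).map (fun t => t + c) := by
  rw [PySem.List.pyRange_one, PySem.List.pyRange_one, List.map_map]
  have h : b + c - (a + c) = b - a := by ring
  rw [h]
  exact List.map_congr_left (fun k _ => by simp [Function.comp]; ring)

-- A's nested guards equal B's per-point conjunctive guards
lemma pvBody_eq_conj (minx maxx miny maxy : Int) (e : List (Int × Int)) (ix p q : Int) :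
    pvBody minx maxx miny maxy e ix p q
      = (let e1 := if minx ≤ ix ∧ ix ≤ maxx ∧ miny ≤ p ∧ p ≤ maxy then PySem.Set.add e (ix, p) else e
         if minx ≤ ix ∧ ix ≤ maxx ∧ miny ≤ q ∧ q ≤ maxy then PySem.Set.add e1 (ix, q) else e1) := by
  unfold pvBody
  by_cases hx : minx ≤ ix ∧ ix ≤ maxx
  · obtain ⟨hx1, hx2⟩ := hx
    simp [hx1, hx2]
  · have c1 : ¬(minx ≤ ix ∧ ix ≤ maxx ∧ miny ≤ p ∧ p ≤ maxy) := fun h => hx ⟨h.1, h.2.1⟩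
    have c2 : ¬(minx ≤ ix ∧ ix ≤ maxx ∧ miny ≤ q ∧ q ≤ maxy) := fun h => hx ⟨h.1, h.2.1⟩
    simp only [if_neg hx, if_neg c1, if_neg c2]

-- pointwise: on the left half (dx < 0) B's step is A's pure body at ix = x + dx
lemma step_eq_left (x y minx maxx miny maxy k : Int) (e : List (Int × Int)) (dx : Int)
    (hneg : dx < 0) :
    pvStepB x y minx maxx miny maxy k e dx
      = pvBody minx maxx miny maxy e (x + dx) ((y - x + k) + (x + dx)) ((y + x - k) - (x + dx)) := by
  have hs : ¬ (0 ≤ dx) := by omega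
  have habs : |dx| = -dx := abs_of_neg hneg
  rw [pvBody_eq_conj]
  simp only [pvStepB, habs, hs, if_false]
  have h1 : y - -1 * (k - -dx) = (y - x + k) + (x + dx) := by ring
  have h2 : y + -1 * (k - -dx) = (y + x - k) - (x + dx) := by ring
  rw [h1, h2]

-- pointwise: on the right half (0 ≤ dx) B's step is A's pure body at ix = x + dx
lemma step_eq_right (x y minx maxx miny maxy k : Int) (e : List (Int × Int)) (dx : Int)
    (hpos : 0 ≤ dx) :
    pvStepB x y minx maxx miny maxy k e dx
      = pvBody minx maxx miny maxy e (x + dx) ((y - k - x) + (x + dx)) ((y + k + x) - (x + dx)) := by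
  have habs : |dx| = dx := abs_of_nonneg hpos
  rw [pvBody_eq_conj]
  simp only [pvStepB, habs, hpos, if_true]
  have h1 : y - 1 * (k - dx) = (y - k - x) + (x + dx) := by ring
  have h2 : y + 1 * (k - dx) = (y + k + x) - (x + dx) := by ring
  rw [h1, h2]

-- the core equality, for a well-shaped box
lemma main_eq (x y d minx maxx miny maxy : Int) :
    (((PySem.List.pyRange x (x + d + 2) 1).foldl (pvStepA minx maxx miny maxy)
        ((((PySem.List.pyRange (x - d - 1) x 1).foldl (pvStepA minx maxx miny maxy)
            ((PySem.Set.empty : PySem.Set (Int × Int)), y, y)).1), y - d - 1, y + d + 1)).1)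
      = (PySem.List.pyRange (-(d + 1)) ((d + 1) + 1) 1).foldl
          (pvStepB x y minx maxx miny maxy (d + 1)) (PySem.Set.empty : PySem.Set (Int × Int)) := by
  set k : Int := d + 1 with hk
  by_cases hknn : 0 ≤ k
  · -- k ≥ 0 : split B's range at 0, shift A's ranges by x, eliminate the counters
    have hsplit : PySem.List.pyRange (-k) (k + 1) 1
        = PySem.List.pyRange (-k) 0 1 ++ PySem.List.pyRange 0 (k + 1) 1 :=
      PySem.List.pyRange_one_append _ _ _ (by omega) (by omega)
    rw [hsplit, List.foldl_append]
    -- segment 1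
    have hr1 : PySem.List.pyRange (x - d - 1) x 1
        = (PySem.List.pyRange (-k) 0 1).map (fun t => t + x) := by
      have := pyRange_shift (-k) 0 x
      have he : -k + x = x - d - 1 := by omega
      rw [he] at this
      simpa using this
    have hy : (y : Int) = (y - x + k) + (x - d - 1) := by omega
    have hy2 : (y : Int) = (y + x - k) - (x - d - 1) := by omega
    have seg1 : ((PySem.List.pyRange (x - d - 1) x 1).foldl (pvStepA minx maxx miny maxy)
          ((PySem.Set.empty : PySem.Set (Int × Int)), y, y)).1
        = (PySem.List.pyRange (-k) 0 1).foldl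
            (pvStepB x y minx maxx miny maxy k) (PySem.Set.empty : PySem.Set (Int × Int)) := by
      conv_lhs => rw [show ((PySem.Set.empty : PySem.Set (Int × Int)), y, y)
        = ((PySem.Set.empty : PySem.Set (Int × Int)), (y - x + k) + (x - d - 1), (y + x - k) - (x - d - 1)) by
          rw [← hy, ← hy2]]
      rw [foldA_elim minx maxx miny maxy (y - x + k) (y + x - k) (x - (x - d - 1)).toNat (x - d - 1) x rfl]
      rw [hr1, List.foldl_map]
      refine PySem.List.foldl_congr_mem _ _ _ _ (fun e dx hdx => ?_)
      have hmem := (PySem.List.mem_pyRange_one).1 hdx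
      rw [step_eq_left x y minx maxx miny maxy k e dx (by omega), Int.add_comm dx x]
    -- segment 2
    have hr2 : PySem.List.pyRange x (x + d + 2) 1
        = (PySem.List.pyRange 0 (k + 1) 1).map (fun t => t + x) := by
      have := pyRange_shift 0 (k + 1) x
      have he : (0 : Int) + x = x := by omega
      have he2 : (k + 1) + x = x + d + 2 := by omega
      rw [he, he2] at this
      exact this
    rw [seg1]
    have hyy : y - d - 1 = (y - k - x) + x := by omega
    have hyy2 : y + d + 1 = (y + k + x) - x := by omega
    rw [hyy, hyy2]
    rw [foldA_elim minx maxx miny maxy (y - k - x) (y + k + x) ((x + d + 2) - x).toNat x (x + d + 2) rfl]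
    rw [hr2, List.foldl_map]
    refine PySem.List.foldl_congr_mem _ _ _ _ (fun e dx hdx => ?_)
    have hmem := (PySem.List.mem_pyRange_one).1 hdx
    rw [step_eq_right x y minx maxx miny maxy k e dx (by omega), Int.add_comm dx x]
  · -- k < 0 : every range is empty on both sides
    rw [PySem.List.pyRange_one_eq_nil (show x ≤ x - d - 1 by omega),
        PySem.List.pyRange_one_eq_nil (show x + d + 2 ≤ x by omega),
        PySem.List.pyRange_one_eq_nil (show k + 1 ≤ -k by omega)]
    rfl

-- ===== VERDICT (by name: the statement is the Claim_ definition above) =====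
theorem get_sensor_edge_points_spec : Claim_equal_get_sensor_edge_points := by
  intro sensor r _ hpre
  obtain ⟨⟨x, y⟩, d⟩ := sensor
  have hsh : r.length = 2 ∧ (r.getD 0 []).length = 2 ∧ (r.getD 1 []).length = 2 := by
    obtain ⟨hlen, hall⟩ := hpre
    refine ⟨hlen, ?_, ?_⟩
    · match r, hlen with
      | [l1, l2], _ => exact hall l1 (by simp)
    · match r, hlen with
      | [l1, l2], _ => exact hall l2 (by simp)
  show get_sensor_edge_points ((x, y), d) r = get_sensor_edge_points_alt ((x, y), d) r
  rw [get_sensor_edge_points, get_sensor_edge_points_alt, if_pos hsh, if_pos hsh]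
  exact main_eq x y d _ _ _ _
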